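-- pv_equiv track=rewrite | github.com/TassWay-tech/Codeforces_Solution | Round830(Div.2)/A.py | solution
-- ===== SOURCE A (Python) =====
-- def solution(items: list, n: int):
--     s1, s2 = (0, 0)
--     for item in items:
--         if item < 0:
--             s2 += item
--         else:
--             s1 += item
--
--     s1, s2 = abs(s1), abs(s2)
--     return abs(s1 - s2)
-- ===== SOURCE B (Python) =====
-- def solution(items: list, n: int):
--     # |sum of nonnegatives| - |sum of negatives| == total sum, so the answer is |sum(items)|
--     return abs(sum(items))
-- ===== Notes on version B (the rewrite author's own statement) =====
-- stated objective: simpler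
-- what changed: Replaced the sign-partitioning loop with two accumulators by the closed form abs(sum(items)), using that |pos_sum| - |neg_sum| equals the total sum.
import Mathlib
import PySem

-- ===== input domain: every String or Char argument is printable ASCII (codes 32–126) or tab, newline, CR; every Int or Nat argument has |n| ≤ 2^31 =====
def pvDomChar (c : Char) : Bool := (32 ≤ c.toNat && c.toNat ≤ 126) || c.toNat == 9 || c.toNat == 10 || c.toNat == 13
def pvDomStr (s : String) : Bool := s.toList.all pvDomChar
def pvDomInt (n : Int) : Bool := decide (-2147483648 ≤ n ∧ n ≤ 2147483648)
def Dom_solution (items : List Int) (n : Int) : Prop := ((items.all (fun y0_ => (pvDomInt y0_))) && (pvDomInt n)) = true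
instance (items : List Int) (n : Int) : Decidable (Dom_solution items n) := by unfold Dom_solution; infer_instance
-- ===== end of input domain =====

-- B replaces A's sign-partitioning loop by the closed form |sum items| (simpler, same value).

-- ===== PORT A =====
-- literal port: loop accumulating (s1, s2), then abs(|s1| - |s2|)
def solution (items : List Int) (n : Int) : Int :=
  let p := items.foldl (fun (st : Int × Int) item =>
    if item < 0 then (st.1, st.2 + item) else (st.1 + item, st.2)) (0, 0)
  let s1 := |p.1|
  let s2 := |p.2|
  |s1 - s2|

-- ===== PORT B =====
def solution_alt (items : List Int) (n : Int) : Int :=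
  |items.sum|

-- ===== PRECONDITION & SPEC =====
def Spec_solution (items : List Int) (n : Int) (out : Int) : Prop := out = solution_alt items n
instance (items : List Int) (n : Int) (out : Int) : Decidable (Spec_solution items n out) := by unfold Spec_solution; infer_instance

-- ===== CLAIM (what is proved, stated in full; the proofs are below) =====
def Claim_equal_solution : Prop := ∀ (items : List Int) (n : Int), Dom_solution items n → Spec_solution items n (solution items n)

-- ===== LEMMAS AND PROOFS =====

-- the loop adds the list's sum to the pair's total and keeps s1 ≥ 0, s2 ≤ 0
theorem solution_loop_inv (items : List Int) (s1 s2 : Int) (h1 : 0 ≤ s1) (h2 : s2 ≤ 0) :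
    let p := items.foldl (fun (st : Int × Int) item =>
      if item < 0 then (st.1, st.2 + item) else (st.1 + item, st.2)) (s1, s2)
    p.1 + p.2 = s1 + s2 + items.sum ∧ 0 ≤ p.1 ∧ p.2 ≤ 0 := by
  induction items generalizing s1 s2 with
  | nil => exact ⟨by simp, h1, h2⟩
  | cons x xs ih =>
    simp only [List.foldl_cons, List.sum_cons]
    by_cases hx : x < 0
    · simp only [if_pos hx]
      have := ih s1 (s2 + x) h1 (by omega)
      refine ⟨by omega, this.2⟩
    · simp only [if_neg hx]
      have := ih (s1 + x) s2 (by omega) h2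
      refine ⟨by omega, this.2⟩

-- ===== VERDICT (by name: the statement is the Claim_ definition above) =====
theorem solution_spec : Claim_equal_solution := by
  intro items n _
  unfold Spec_solution solution solution_alt
  have h := solution_loop_inv items 0 0 le_rfl le_rfl
  simp only at h
  obtain ⟨hsum, hp1, hp2⟩ := h
  set p := items.foldl (fun (st : Int × Int) item =>
    if item < 0 then (st.1, st.2 + item) else (st.1 + item, st.2)) (0, 0) with hp
  simp only
  rw [abs_of_nonneg hp1, abs_of_nonpos hp2, sub_neg_eq_add, hsum]
  norm_num
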